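-- pv_equiv track=rewrite | github.com/kamilczerwinski22/Advent-of-Code | main_files/year_2016/day_7/year2016_day7_part2.py | ssl_checker
-- ===== SOURCE A (Python) =====
-- def ssl_checker(inside_brackets: list, outside_brackets: list) -> bool:
--     inside_brackets_sequences = set()
--     outside_brackets_sequences = set()
--
--     # standard ABA check
--     for in_element in inside_brackets:
--         for i in range(len(in_element) - 2):
--             left, middle, right = in_element[i], in_element[i + 1], in_element[i + 2]
--             if left == right:
--                 inside_brackets_sequences.add(left + middle + right)
--
--     # BAB check with conversion to ABA convention
--     for out_element in outside_brackets:
--         for j in range(len(out_element) - 2):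
--             left, middle, right = out_element[j], out_element[j + 1], out_element[j + 2]
--             if left == right:
--                 outside_brackets_sequences.add(middle + left + middle)
--     # check if any elements inside brackets are opposite to elements outside brackets
--     return bool(inside_brackets_sequences.intersection(outside_brackets_sequences))
-- ===== SOURCE B (Python) =====
-- def ssl_checker(inside_brackets: list, outside_brackets: list) -> bool:
--     # No auxiliary sets: for each BAB found outside the brackets, search its
--     # canonical ABA form directly as a substring of the inside groups.
--     for out in outside_brackets:
--         for j in range(len(out) - 2):
--             if out[j] == out[j + 2]:
--                 aba = out[j + 1] + out[j] + out[j + 1]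
--                 if any(aba in seq for seq in inside_brackets):
--                     return True
--     return False
-- ===== Notes on version B (the rewrite author's own statement) =====
-- stated objective: simpler
-- what changed: B drops A's two sets and the set.intersection entirely: it scans the outside groups and, at each BAB, checks whether the corresponding ABA occurs as a substring of any inside group, returning True at the first hit; correctness rests on the fact that any 3-char substring b+a+b automatically has equal outer characters.
import Mathlib
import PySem

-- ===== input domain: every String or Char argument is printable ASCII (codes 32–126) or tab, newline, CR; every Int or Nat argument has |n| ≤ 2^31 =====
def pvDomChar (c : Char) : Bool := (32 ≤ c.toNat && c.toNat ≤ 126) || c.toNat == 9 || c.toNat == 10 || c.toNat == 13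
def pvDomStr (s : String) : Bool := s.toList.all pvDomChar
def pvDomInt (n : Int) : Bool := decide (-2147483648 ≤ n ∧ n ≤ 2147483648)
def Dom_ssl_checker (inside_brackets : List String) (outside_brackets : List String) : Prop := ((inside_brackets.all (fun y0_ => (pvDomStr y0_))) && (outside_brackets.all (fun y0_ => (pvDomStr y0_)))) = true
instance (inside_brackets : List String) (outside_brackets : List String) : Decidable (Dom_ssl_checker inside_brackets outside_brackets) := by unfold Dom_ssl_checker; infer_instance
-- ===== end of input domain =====

-- B drops A's two sets and the intersection: at each outside BAB it searches the
-- ABA form directly as a substring of the inside groups, returning at the first hit.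

-- ===== PORT A =====
def ssl_checker (inside_brackets : List String) (outside_brackets : List String) : Bool :=
  let inside_brackets_sequences : PySem.Set String :=
    inside_brackets.foldl (fun acc in_element =>
      (List.range (in_element.toList.length - 2)).foldl (fun acc2 i =>
        let left := in_element.toList.getD i ' '
        let middle := in_element.toList.getD (i + 1) ' '
        let right := in_element.toList.getD (i + 2) ' '
        if left == right then PySem.Set.add acc2 (String.ofList [left, middle, right]) else acc2)
        acc)
      PySem.Set.empty
  let outside_brackets_sequences : PySem.Set String :=
    outside_brackets.foldl (fun acc out_element =>
      (List.range (out_element.toList.length - 2)).foldl (fun acc2 j =>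
        let left := out_element.toList.getD j ' '
        let middle := out_element.toList.getD (j + 1) ' '
        let right := out_element.toList.getD (j + 2) ' '
        if left == right then PySem.Set.add acc2 (String.ofList [middle, left, middle]) else acc2)
        acc)
      PySem.Set.empty
  !(PySem.Set.inter inside_brackets_sequences outside_brackets_sequences).isEmpty

-- ===== PORT B =====
def ssl_checker_alt (inside_brackets : List String) (outside_brackets : List String) : Bool :=
  outside_brackets.any (fun out =>
    (List.range (out.toList.length - 2)).any (fun j =>
      out.toList.getD j ' ' == out.toList.getD (j + 2) ' ' &&
      (let aba := String.ofList [out.toList.getD (j + 1) ' ', out.toList.getD j ' ',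
                                 out.toList.getD (j + 1) ' ']
       inside_brackets.any (fun seq => PySem.Str.isIn aba seq))))

-- ===== PRECONDITION & SPEC =====
def Spec_ssl_checker (inside_brackets : List String) (outside_brackets : List String) (out : Bool) : Prop := out = ssl_checker_alt inside_brackets outside_brackets
instance (inside_brackets : List String) (outside_brackets : List String) (out : Bool) : Decidable (Spec_ssl_checker inside_brackets outside_brackets out) := by unfold Spec_ssl_checker; infer_instance

-- ===== CLAIM =====
def Claim_equal_ssl_checker : Prop := ∀ (inside_brackets : List String) (outside_brackets : List String), Dom_ssl_checker inside_brackets outside_brackets → Spec_ssl_checker inside_brackets outside_brackets (ssl_checker inside_brackets outside_brackets)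

-- ===== LEMMAS AND PROOFS =====

-- membership in a conditional fold of Set.add over one group's positions
theorem mem_foldl_add_if {α ι : Type} [BEq α] [LawfulBEq α]
    (l : List ι) (p : ι → Bool) (f : ι → α) (s : PySem.Set α) (x : α) :
    x ∈ l.foldl (fun acc i => if p i then PySem.Set.add acc (f i) else acc) s ↔
      x ∈ s ∨ ∃ i ∈ l, p i ∧ x = f i := by
  induction l generalizing s with
  | nil => simp
  | cons a l ih =>
    simp only [List.foldl_cons, ih]
    by_cases h : p a = true
    · simp only [h, if_true, PySem.Set.mem_add, List.exists_mem_cons_iff]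
      tauto
    · simp only [h, if_false, Bool.false_eq_true, List.exists_mem_cons_iff]
      tauto

-- membership in the two-level fold over all groups
theorem mem_foldl_groups {α : Type} [BEq α] [LawfulBEq α]
    (gs : List String) (p : String → Nat → Bool) (f : String → Nat → α)
    (s : PySem.Set α) (x : α) :
    x ∈ gs.foldl (fun acc g =>
        (List.range (g.toList.length - 2)).foldl
          (fun acc2 i => if p g i then PySem.Set.add acc2 (f g i) else acc2) acc) s ↔
      x ∈ s ∨ ∃ g ∈ gs, ∃ i ∈ List.range (g.toList.length - 2), p g i ∧ x = f g i := by
  induction gs generalizing s with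
  | nil => simp
  | cons g gs ih =>
    simp only [List.foldl_cons, ih, mem_foldl_add_if]
    constructor
    · rintro (⟨h | ⟨i, hi, hp, hx⟩⟩ | ⟨g', hg', i, hi, hp, hx⟩)
      · exact Or.inl h
      · exact Or.inr ⟨g, List.mem_cons_self, i, hi, hp, hx⟩
      · exact Or.inr ⟨g', List.mem_cons_of_mem _ hg', i, hi, hp, hx⟩
    · rintro (h | ⟨g', hg', i, hi, hp, hx⟩)
      · exact Or.inl (Or.inl h)
      · rcases List.mem_cons.mp hg' with rfl | hg'
        · exact Or.inl (Or.inr ⟨i, hi, hp, hx⟩)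
        · exact Or.inr ⟨g', hg', i, hi, hp, hx⟩

-- a 3-character substring occurs iff it matches at some in-range position
theorem triple_infix_iff (c d e : Char) (l : List Char) :
    PySem.Chars.isIn [c, d, e] l = true ↔
      ∃ i ∈ List.range (l.length - 2),
        l.getD i ' ' = c ∧ l.getD (i + 1) ' ' = d ∧ l.getD (i + 2) ' ' = e := by
  rw [← PySem.Chars.exists_prefix_drop_iff_isIn]
  constructor
  · rintro ⟨j, t, hpre⟩
    have hlen : j + 2 < l.length := by
      have := congrArg List.length hpre
      simp [List.length_drop] at this
      omega
    have h0 : l[j]? = some c := by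
      have : (l.drop j)[0]? = some c := by rw [← hpre]; rfl
      simpa [List.getElem?_drop] using this
    have h1 : l[j + 1]? = some d := by
      have : (l.drop j)[1]? = some d := by rw [← hpre]; rfl
      simpa [List.getElem?_drop] using this
    have h2 : l[j + 2]? = some e := by
      have : (l.drop j)[2]? = some e := by rw [← hpre]; rfl
      simpa [List.getElem?_drop] using this
    refine ⟨j, List.mem_range.mpr (by omega), ?_, ?_, ?_⟩ <;>
      simp_all [List.getD_eq_getElem?_getD]
  · rintro ⟨i, hi, hc, hd, he⟩
    have hlen : i + 2 < l.length := by
      have := List.mem_range.mp hi; omega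
    rw [List.getD_eq_getElem l ' ' (show i < l.length by omega)] at hc
    rw [List.getD_eq_getElem l ' ' (show i + 1 < l.length by omega)] at hd
    rw [List.getD_eq_getElem l ' ' hlen] at he
    refine ⟨i, l.drop (i + 3), ?_⟩
    apply List.ext_getElem?
    intro k
    match k with
    | 0 =>
      simp [List.getElem?_drop, List.getElem?_eq_getElem (show i < l.length by omega), hc]
    | 1 =>
      simp [List.getElem?_drop, List.getElem?_eq_getElem (show i + 1 < l.length by omega), hd]
    | 2 =>
      simp [List.getElem?_drop, List.getElem?_eq_getElem hlen, he]
    | (n + 3) =>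
      simp only [List.getElem?_append_right (by simp : ([c, d, e] : List Char).length ≤ n + 3),
        List.getElem?_drop]
      congr 1
      simp
      omega

-- A's inside-set membership of an ABA string = B's substring search over the groups
theorem contains_inside_eq_any_isIn (ins : List String) (m c : Char) :
    PySem.Set.contains
      (ins.foldl (fun acc g =>
        (List.range (g.toList.length - 2)).foldl (fun acc2 i =>
          if g.toList.getD i ' ' == g.toList.getD (i + 2) ' ' then
            PySem.Set.add acc2
              (String.ofList [g.toList.getD i ' ', g.toList.getD (i + 1) ' ',
                              g.toList.getD (i + 2) ' '])
          else acc2) acc) PySem.Set.empty)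
      (String.ofList [m, c, m])
    = ins.any (fun seq => PySem.Str.isIn (String.ofList [m, c, m]) seq) := by
  rw [Bool.eq_iff_iff, PySem.Set.contains_iff,
    mem_foldl_groups ins
      (fun g i => g.toList.getD i ' ' == g.toList.getD (i + 2) ' ')
      (fun g i => String.ofList [g.toList.getD i ' ', g.toList.getD (i + 1) ' ',
                                 g.toList.getD (i + 2) ' '])]
  simp only [PySem.Set.empty, List.not_mem_nil, false_or, List.any_eq_true,
    PySem.Str.isIn_eq, String.toList_ofList, triple_infix_iff]
  constructor
  · rintro ⟨g, hg, i, hi, hp, hx⟩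
    have hx' : [m, c, m] = [g.toList.getD i ' ', g.toList.getD (i + 1) ' ',
                            g.toList.getD (i + 2) ' '] := by
      have := congrArg String.toList hx
      simpa using this
    simp only [List.cons.injEq, and_true] at hx'
    obtain ⟨e0, e1, e2⟩ := hx'
    exact ⟨g, hg, i, hi, e0.symm, e1.symm, e2.symm⟩
  · rintro ⟨g, hg, i, hi, h0, h1, h2⟩
    refine ⟨g, hg, i, hi, by rw [beq_iff_eq, h0, h2], ?_⟩
    rw [h0, h1, h2]

-- A's intersection-nonempty over the common loop shapes = scan with membership probe
theorem inter_nonempty_eq_any {α : Type} [BEq α] [LawfulBEq α]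
    (ins outs : List String) (p : String → Nat → Bool) (f h : String → Nat → α) :
    (!(PySem.Set.inter
        (ins.foldl (fun acc g => (List.range (g.toList.length - 2)).foldl
            (fun a i => if p g i then PySem.Set.add a (f g i) else a) acc) PySem.Set.empty)
        (outs.foldl (fun acc g => (List.range (g.toList.length - 2)).foldl
            (fun a j => if p g j then PySem.Set.add a (h g j) else a) acc) PySem.Set.empty)).isEmpty)
      = outs.any (fun g => (List.range (g.toList.length - 2)).any (fun j =>
          p g j && PySem.Set.contains
            (ins.foldl (fun acc g' => (List.range (g'.toList.length - 2)).foldl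
                (fun a i => if p g' i then PySem.Set.add a (f g' i) else a) acc) PySem.Set.empty)
            (h g j))) := by
  rw [Bool.eq_iff_iff, Bool.not_eq_eq_eq_not, Bool.not_true, List.isEmpty_eq_false_iff_exists_mem]
  simp only [PySem.Set.mem_inter, mem_foldl_groups, List.any_eq_true, Bool.and_eq_true,
    PySem.Set.contains_iff, PySem.Set.empty, List.not_mem_nil, false_or]
  constructor
  · rintro ⟨x, hin, g, hg, j, hj, hp, rfl⟩
    exact ⟨g, hg, j, hj, hp, hin⟩
  · rintro ⟨g, hg, j, hj, hp, hin⟩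
    exact ⟨h g j, hin, g, hg, j, hj, hp, rfl⟩

-- ===== VERDICT =====
theorem ssl_checker_spec : Claim_equal_ssl_checker := by
  intro ins outs _
  unfold Spec_ssl_checker ssl_checker ssl_checker_alt
  rw [inter_nonempty_eq_any ins outs
    (fun g i => g.toList.getD i ' ' == g.toList.getD (i + 2) ' ')
    (fun g i => String.ofList [g.toList.getD i ' ', g.toList.getD (i + 1) ' ', g.toList.getD (i + 2) ' '])
    (fun g j => String.ofList [g.toList.getD (j + 1) ' ', g.toList.getD j ' ', g.toList.getD (j + 1) ' '])]
  simp only [contains_inside_eq_any_isIn]
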